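-- pv_equiv track=rewrite | github.com/Xingxing0627/metab-pathway-ml-starter | scripts/33_beam_expand.py | nonneg_combo
-- ===== SOURCE A (Python) =====
-- BALANCE_ELEMS = ("C", "H", "O", "Cl")  # include Cl in count-level balance
--
-- def nonneg_combo(diff, vecs):
--     # exact representation on C/H/O/Cl by nonnegative integer combo of vecs
--     if not vecs:
--         return all(v == 0 for v in diff.values())
--     keys = set(k for v in vecs for k in v.keys())
--     consider = [k for k in BALANCE_ELEMS if (k in diff) or (k in keys)]
--     for k in consider:
--         if diff.get(k, 0) > 0 and all(v.get(k, 0) == 0 for v in vecs):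
--             return False
--     lim = 32
--     V = vecs[:3]
--     L = len(V)
--     if L == 1:
--         v = V[0]
--         for n0 in range(lim):
--             if all(n0 * v.get(k, 0) == diff.get(k, 0) for k in consider):
--                 return True
--         return False
--     if L == 2:
--         v0, v1 = V
--         for n0 in range(lim):
--             for n1 in range(lim):
--                 if all(n0 * v0.get(k, 0) + n1 * v1.get(k, 0) == diff.get(k, 0) for k in consider):
--                     return True
--         return False
--     v0, v1, v2 = V[0], V[1], V[2]
--     for n0 in range(lim // 2):
--         for n1 in range(lim // 2):
--             for n2 in range(lim // 2):
--                 if all(n0 * v0.get(k, 0) + n1 * v1.get(k, 0) + n2 * v2.get(k, 0) == diff.get(k, 0) for k in consider):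
--                     return True
--     return False
-- ===== SOURCE B (Python) =====
-- BALANCE_ELEMS = ("C", "H", "O", "Cl")  # include Cl in count-level balance
--
--
-- def nonneg_combo(diff, vecs):
--     # exact representation on C/H/O/Cl by nonnegative integer combo of vecs;
--     # uniform recursive DFS over the (at most 3) vectors instead of per-arity nested loops
--     if not vecs:
--         return all(v == 0 for v in diff.values())
--     keys = set(k for v in vecs for k in v.keys())
--     consider = [k for k in BALANCE_ELEMS if (k in diff) or (k in keys)]
--     for k in consider:
--         if diff.get(k, 0) > 0 and all(v.get(k, 0) == 0 for v in vecs):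
--             return False
--     V = vecs[:3]
--     bound = 16 if len(V) == 3 else 32
--     def dfs(i, rem):
--         if i == len(V):
--             return all(t == 0 for _, t in rem)
--         v = V[i]
--         return any(dfs(i + 1, [(k, t - n * v.get(k, 0)) for (k, t) in rem])
--                    for n in range(bound))
--     return dfs(0, [(k, diff.get(k, 0)) for k in consider])
-- ===== Notes on version B (the rewrite author's own statement) =====
-- stated objective: simpler
-- what changed: Replaced A's three separate per-arity nested-loop branches (1, 2 or 3 vectors, each with its own hard-coded loop nest) by a single uniform recursive DFS over the truncated vector list that carries the still-unmet targets, with the coefficient bound 16 for three vectors and 32 otherwise.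
import Mathlib
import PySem

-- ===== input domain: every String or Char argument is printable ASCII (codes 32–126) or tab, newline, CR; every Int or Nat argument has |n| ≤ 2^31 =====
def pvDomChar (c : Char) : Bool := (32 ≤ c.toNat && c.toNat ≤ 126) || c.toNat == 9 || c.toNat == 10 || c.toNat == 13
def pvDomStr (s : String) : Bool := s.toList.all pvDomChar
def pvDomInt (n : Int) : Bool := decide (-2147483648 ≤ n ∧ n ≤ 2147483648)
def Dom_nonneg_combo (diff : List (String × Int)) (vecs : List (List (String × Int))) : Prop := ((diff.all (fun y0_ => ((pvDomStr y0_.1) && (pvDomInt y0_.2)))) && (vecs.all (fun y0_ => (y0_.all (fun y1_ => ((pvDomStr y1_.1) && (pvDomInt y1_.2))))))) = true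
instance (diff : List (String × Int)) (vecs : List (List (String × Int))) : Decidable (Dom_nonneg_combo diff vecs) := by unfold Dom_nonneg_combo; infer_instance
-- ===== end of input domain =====

-- B replaces A's three per-arity nested-loop branches by one uniform recursive DFS over the
-- (at most 3) vectors carrying the remaining targets; same value everywhere (objective: simpler).

def pvBalanceElems : List String := ["C", "H", "O", "Cl"]

-- ===== PORT A =====
def nonneg_combo (diff : List (String × Int)) (vecs : List (List (String × Int))) : Bool :=
  let d : PySem.Dict String Int := PySem.Dict.mk diff
  let vs : List (PySem.Dict String Int) := vecs.map PySem.Dict.mk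
  if vs.isEmpty then
    d.values.all (fun v => v == 0)
  else
    let keys : PySem.Set String := PySem.Set.ofList (vs.flatMap (fun v => v.keys))
    let consider : List String :=
      pvBalanceElems.filter (fun k => d.contains k || PySem.Set.contains keys k)
    -- "for k in consider: if …: return False" = an any-scan deciding an early False
    if consider.any (fun k =>
        decide (d.getD k 0 > 0) && vs.all (fun v => v.getD k 0 == 0)) then
      false
    else
      let lim : Int := 32
      let V : List (PySem.Dict String Int) := PySem.List.slice vs none (some 3)
      match V with
      | [v] =>
          (PySem.List.pyRange 0 lim 1).any (fun n0 =>
            consider.all (fun k => n0 * v.getD k 0 == d.getD k 0))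
      | [v0, v1] =>
          (PySem.List.pyRange 0 lim 1).any (fun n0 =>
            (PySem.List.pyRange 0 lim 1).any (fun n1 =>
              consider.all (fun k =>
                n0 * v0.getD k 0 + n1 * v1.getD k 0 == d.getD k 0)))
      | v0 :: v1 :: v2 :: _ =>
          (PySem.List.pyRange 0 (PySem.Int.floordiv lim 2) 1).any (fun n0 =>
            (PySem.List.pyRange 0 (PySem.Int.floordiv lim 2) 1).any (fun n1 =>
              (PySem.List.pyRange 0 (PySem.Int.floordiv lim 2) 1).any (fun n2 =>
                consider.all (fun k =>
                  n0 * v0.getD k 0 + n1 * v1.getD k 0 + n2 * v2.getD k 0 == d.getD k 0))))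
      | [] => false   -- unreachable: vecs is nonempty, so V = vecs[:3] is nonempty

-- ===== PORT B =====
-- dfs(i, rem) of Source B: structural recursion over the remaining vectors, rem = still-unmet targets
def pvDfs (bound : Int) (V : List (PySem.Dict String Int)) (rem : List (String × Int)) : Bool :=
  match V with
  | [] => rem.all (fun p => p.2 == 0)
  | v :: rest =>
      (PySem.List.pyRange 0 bound 1).any (fun n =>
        pvDfs bound rest (rem.map (fun p => (p.1, p.2 - n * v.getD p.1 0))))

def nonneg_combo_alt (diff : List (String × Int)) (vecs : List (List (String × Int))) : Bool :=
  let d : PySem.Dict String Int := PySem.Dict.mk diff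
  let vs : List (PySem.Dict String Int) := vecs.map PySem.Dict.mk
  if vs.isEmpty then
    d.values.all (fun v => v == 0)
  else
    let keys : PySem.Set String := PySem.Set.ofList (vs.flatMap (fun v => v.keys))
    let consider : List String :=
      pvBalanceElems.filter (fun k => d.contains k || PySem.Set.contains keys k)
    if consider.any (fun k =>
        decide (d.getD k 0 > 0) && vs.all (fun v => v.getD k 0 == 0)) then
      false
    else
      let V : List (PySem.Dict String Int) := PySem.List.slice vs none (some 3)
      let bound : Int := if V.length == 3 then 16 else 32
      pvDfs bound V (consider.map (fun k => (k, d.getD k 0)))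

-- ===== PRECONDITION & SPEC =====
def Spec_nonneg_combo (diff : List (String × Int)) (vecs : List (List (String × Int))) (out : Bool) : Prop := out = nonneg_combo_alt diff vecs
instance (diff : List (String × Int)) (vecs : List (List (String × Int))) (out : Bool) : Decidable (Spec_nonneg_combo diff vecs out) := by unfold Spec_nonneg_combo; infer_instance

-- ===== CLAIM (what is proved, stated in full; the proofs are below) =====
def Claim_equal_nonneg_combo : Prop := ∀ (diff : List (String × Int)) (vecs : List (List (String × Int))), Dom_nonneg_combo diff vecs → Spec_nonneg_combo diff vecs (nonneg_combo diff vecs)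

-- ===== LEMMAS AND PROOFS =====

theorem pvDfs_eq_one (b : Int) (v : PySem.Dict String Int) (rem : List (String × Int)) :
    pvDfs b [v] rem =
      (PySem.List.pyRange 0 b 1).any (fun n =>
        rem.all (fun p => p.2 - n * v.getD p.1 0 == 0)) := by
  simp [pvDfs, List.all_map, Function.comp_def]

theorem pvDfs_eq_two (b : Int) (v0 v1 : PySem.Dict String Int) (rem : List (String × Int)) :
    pvDfs b [v0, v1] rem =
      (PySem.List.pyRange 0 b 1).any (fun n0 =>
        (PySem.List.pyRange 0 b 1).any (fun n1 =>
          rem.all (fun p => p.2 - n0 * v0.getD p.1 0 - n1 * v1.getD p.1 0 == 0))) := by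
  simp [pvDfs, List.all_map, List.map_map, Function.comp_def]

theorem pvDfs_eq_three (b : Int) (v0 v1 v2 : PySem.Dict String Int) (rem : List (String × Int)) :
    pvDfs b [v0, v1, v2] rem =
      (PySem.List.pyRange 0 b 1).any (fun n0 =>
        (PySem.List.pyRange 0 b 1).any (fun n1 =>
          (PySem.List.pyRange 0 b 1).any (fun n2 =>
            rem.all (fun p =>
              p.2 - n0 * v0.getD p.1 0 - n1 * v1.getD p.1 0 - n2 * v2.getD p.1 0 == 0)))) := by
  simp [pvDfs, List.all_map, List.map_map, Function.comp_def]

theorem beq_sub_one (x a : Int) : (x - a == 0) = (a == x) := by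
  rw [Bool.eq_iff_iff]; simp [beq_iff_eq]; omega

theorem beq_sub_two (x a b : Int) : (x - a - b == 0) = (a + b == x) := by
  rw [Bool.eq_iff_iff]; simp [beq_iff_eq]; omega

theorem beq_sub_three (x a b c : Int) : (x - a - b - c == 0) = (a + b + c == x) := by
  rw [Bool.eq_iff_iff]; simp [beq_iff_eq]; omega

-- ===== VERDICT (by name: the statement is the Claim_ definition above) =====
theorem nonneg_combo_spec : Claim_equal_nonneg_combo := by
  intro diff vecs _
  unfold Spec_nonneg_combo nonneg_combo nonneg_combo_alt
  cases hvs : vecs.map PySem.Dict.mk with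
  | nil => simp
  | cons w ws =>
    simp only [List.isEmpty_cons, if_false, Bool.false_eq_true]
    split
    · rfl
    · -- remaining: match on V = (w :: ws)[:3] vs pvDfs
      have hsl : PySem.List.slice (w :: ws) none (some 3) = (w :: ws).take 3 := by
        simpa using PySem.List.slice_to_natCast (xs := w :: ws) (b := 3)
      rw [hsl]
      cases ws with
      | nil =>
        simp only [List.take, pvDfs_eq_one, List.all_map]
        simp [beq_sub_one]
      | cons w1 ws1 =>
        cases ws1 with
        | nil =>
          simp only [List.take, pvDfs_eq_two, List.all_map]
          simp [beq_sub_two]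
        | cons w2 ws2 =>
          simp only [List.take, pvDfs_eq_three, List.all_map]
          norm_num [PySem.Int.floordiv]
          simp [beq_sub_three]
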